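-- pv_equiv track=rewrite | github.com/tltower/Color-Experiment | src/color_latent_lab/word_set_sae.py | _build_prompt_rows
-- ===== SOURCE A (Python) =====
-- from typing import Any
--
-- def _sanitize_label_for_filename(value: str) -> str:
--     cleaned = [
--         character.lower() if character.isalnum() else "_"
--         for character in value.strip()
--     ]
--     collapsed = "".join(cleaned).strip("_")
--     while "__" in collapsed:
--         collapsed = collapsed.replace("__", "_")
--     return collapsed or "item"
--
-- def _build_prompt_rows(words: tuple[str, ...]) -> list[dict[str, Any]]:
--     rows: list[dict[str, Any]] = []
--     for index, word in enumerate(words):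
--         rows.append(
--             {
--                 "prompt": word,
--                 "record_id": f"word-{index:04d}-{_sanitize_label_for_filename(word)}",
--                 "schema": "word",
--                 "value": word,
--                 "word": word,
--             }
--         )
--     return rows
-- ===== SOURCE B (Python) =====
-- from typing import Any
--
--
-- def _sanitize_label_for_filename(value: str) -> str:
--     # single left-to-right pass: collapse runs of non-alnum chars to one '_' as we go
--     out = []
--     prev_underscore = False
--     for character in value.strip():
--         if character.isalnum():
--             out.append(character.lower())
--             prev_underscore = False
--         elif not prev_underscore:
--             out.append("_")
--             prev_underscore = True
--     result = "".join(out).strip("_")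
--     return result or "item"
--
--
-- def _build_prompt_rows(words: tuple[str, ...]) -> list[dict[str, Any]]:
--     return [
--         {
--             "prompt": word,
--             "record_id": f"word-{str(index).zfill(4)}-{_sanitize_label_for_filename(word)}",
--             "schema": "word",
--             "value": word,
--             "word": word,
--         }
--         for index, word in enumerate(words)
--     ]
-- ===== Notes on version B (the rewrite author's own statement) =====
-- stated objective: simpler
-- what changed: The sanitizer's map-then-strip-then-fixpoint of replace('__','_') is replaced by one left-to-right scan with a prev-underscore flag that collapses runs as it emits, and the row builder becomes a comprehension.
import Mathlib
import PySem

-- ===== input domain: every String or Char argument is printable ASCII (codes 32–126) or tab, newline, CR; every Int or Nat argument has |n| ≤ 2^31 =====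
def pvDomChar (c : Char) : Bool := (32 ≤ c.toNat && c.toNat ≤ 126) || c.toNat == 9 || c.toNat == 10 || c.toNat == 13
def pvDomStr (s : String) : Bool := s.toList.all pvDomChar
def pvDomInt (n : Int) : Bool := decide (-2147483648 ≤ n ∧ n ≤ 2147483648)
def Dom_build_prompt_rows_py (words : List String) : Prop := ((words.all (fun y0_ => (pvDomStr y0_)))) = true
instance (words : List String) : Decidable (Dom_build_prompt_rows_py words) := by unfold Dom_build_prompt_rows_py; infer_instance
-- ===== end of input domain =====

-- B replaces A's sanitizer (map, strip('_'), then replace('__','_') to a fixpoint) by one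
-- left-to-right scan with a prev-underscore flag; row building becomes a comprehension/map.

-- ===== PORT A =====

-- one left-to-right pass of Python's collapsed.replace("__", "_") (old = "__", new = "_");
-- used to state the termination argument of the while-loop below
def pvPass : List Char → List Char
  | '_' :: '_' :: t => '_' :: pvPass t
  | c :: t => c :: pvPass t
  | [] => []

theorem pvPass_cons (c : Char) (t : List Char) (h : c ≠ '_' ∨ t.head? ≠ some '_') :
    pvPass (c :: t) = c :: pvPass t := by
  rw [pvPass.eq_def]
  split
  · rename_i t' heq
    injection heq with h1 h2
    rcases h with h | h
    · exact absurd h1 h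
    · exact absurd (by rw [h2]; rfl) h
  · rename_i heq
    injection heq with h1 h2
    rw [h1, h2]
  · rename_i heq
    cases heq

theorem pvPass_cons_of_hne (c : Char) (t : List Char)
    (hne : ∀ t', c = '_' → t = '_' :: t' → False) : pvPass (c :: t) = c :: pvPass t := by
  apply pvPass_cons
  by_cases hc : c = '_'
  · refine Or.inr (fun hh => ?_)
    cases t with
    | nil => simp at hh
    | cons a r =>
      simp only [List.head?_cons, Option.some.injEq] at hh
      exact hne r hc (by rw [hh])
  · exact Or.inl hc

theorem pvPass_length_le (cs : List Char) : (pvPass cs).length ≤ cs.length := by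
  induction cs using pvPass.induct with
  | case1 t ih => simp only [pvPass, List.length_cons]; omega
  | case2 c t hne ih =>
    have hcons : pvPass (c :: t) = c :: pvPass t := pvPass_cons_of_hne c t hne
    simp only [hcons, List.length_cons]; omega
  | case3 => simp [pvPass]

theorem pvReplace_go_eq (fuel : Nat) (l acc : List Char) (h : l.length ≤ fuel) :
    PySem.Chars.replace.go ['_', '_'] ['_'] fuel l acc = acc.reverse ++ pvPass l := by
  induction fuel generalizing l acc with
  | zero =>
    have : l = [] := List.length_eq_zero_iff.mp (Nat.le_zero.mp h)
    subst this; simp [PySem.Chars.replace.go, pvPass]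
  | succ n ih =>
    match l with
    | [] => simp [PySem.Chars.replace.go, pvPass]
    | c :: t =>
      rw [PySem.Chars.replace.go]
      by_cases hp : List.isPrefixOf ['_', '_'] (c :: t) = true
      · obtain ⟨s, hs⟩ := List.isPrefixOf_iff_prefix.mp hp
        have hc : c = '_' := by
          have := hs; simp only [List.cons_append, List.nil_append] at this
          injection this with h1 _; exact h1.symm
        have ht : t = '_' :: s := by
          have := hs; simp only [List.cons_append, List.nil_append] at this
          injection this with _ h2; exact h2.symm
        subst hc; subst ht
        simp only [hp, if_true]
        rw [ih _ _ (by simp at h ⊢; omega)]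
        simp [pvPass]
      · simp only [hp, Bool.false_eq_true, if_false]
        rw [ih _ _ (by simp at h ⊢; omega)]
        have hcons : pvPass (c :: t) = c :: pvPass t := by
          apply pvPass_cons_of_hne
          intro t' hc ht'
          subst hc; subst ht'
          exact hp (by simp [List.isPrefixOf])
        simp [hcons]

theorem pvReplace_eq (cs : List Char) :
    PySem.Chars.replace cs ['_', '_'] ['_'] = pvPass cs := by
  simp only [PySem.Chars.replace, List.isEmpty_cons, Bool.false_eq_true, if_false]
  exact pvReplace_go_eq cs.length cs [] le_rfl

theorem pvPass_progress (cs : List Char) (h : ['_', '_'] <:+: cs) :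
    (pvPass cs).length < cs.length := by
  induction cs using pvPass.induct with
  | case1 t ih =>
    have := pvPass_length_le t
    simp only [pvPass, List.length_cons]; omega
  | case2 c t hne ih =>
    have ht : ['_', '_'] <:+: t := by
      rcases List.infix_cons_iff.mp h with hpre | hinf
      · exfalso
        rcases hpre with ⟨s, hs⟩
        simp only [List.cons_append, List.nil_append] at hs
        injection hs with h1 h2
        exact hne s h1.symm h2.symm
      · exact hinf
    have hcons : pvPass (c :: t) = c :: pvPass t := pvPass_cons_of_hne c t hne
    simp only [hcons, List.length_cons]
    exact Nat.succ_lt_succ (ih ht)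
  | case3 => simp at h

-- the 'while "__" in collapsed: collapsed = collapsed.replace("__", "_")' loop
def pvFixLoop (cs : List Char) : List Char :=
  if h : PySem.Chars.isIn ['_', '_'] cs = true then
    pvFixLoop (PySem.Chars.replace cs ['_', '_'] ['_'])
  else cs
termination_by cs.length
decreasing_by
  rw [pvReplace_eq]
  exact pvPass_progress cs ((PySem.Chars.isIn_iff_infix _ _).mp h)

def sanitize_label_py (value : String) : String :=
  let cleaned : List Char := (PySem.Str.strip value).toList.map
    (fun character => if PySem.Chars.isalnum character then PySem.Chars.lowerChar character else '_')
  let collapsed := PySem.Chars.stripChars cleaned ['_']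
  let collapsed := pvFixLoop collapsed
  if collapsed.isEmpty then "item" else String.ofList collapsed

-- f"word-{index:04d}-…": for the nonnegative indices enumerate produces, {index:04d} = str(index).zfill(4)
def build_prompt_rows_py (words : List String) : List (List (String × String)) :=
  (PySem.List.enumerate words 0).foldl
    (fun rows iw => rows ++
      [[("prompt", iw.2),
        ("record_id", "word-" ++ PySem.Str.zfill (PySem.Int.toStr iw.1) 4 ++ "-" ++ sanitize_label_py iw.2),
        ("schema", "word"),
        ("value", iw.2),
        ("word", iw.2)]]) []

-- ===== PORT B =====

def sanitize_label_alt (value : String) : String :=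
  let out := ((PySem.Str.strip value).toList.foldl
    (fun (st : List Char × Bool) character =>
      if PySem.Chars.isalnum character then (st.1 ++ [PySem.Chars.lowerChar character], false)
      else if st.2 then st
      else (st.1 ++ ['_'], true)) ([], false)).1
  let result := PySem.Chars.stripChars out ['_']
  if result.isEmpty then "item" else String.ofList result

def build_prompt_rows_py_alt (words : List String) : List (List (String × String)) :=
  (PySem.List.enumerate words 0).map
    (fun iw =>
      [("prompt", iw.2),
       ("record_id", "word-" ++ PySem.Str.zfill (PySem.Int.toStr iw.1) 4 ++ "-" ++ sanitize_label_alt iw.2),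
       ("schema", "word"),
       ("value", iw.2),
       ("word", iw.2)])

-- ===== PRECONDITION & SPEC =====
def Spec_build_prompt_rows_py (words : List String) (out : List (List (String × String))) : Prop := out = build_prompt_rows_py_alt words
instance (words : List String) (out : List (List (String × String))) : Decidable (Spec_build_prompt_rows_py words out) := by unfold Spec_build_prompt_rows_py; infer_instance

-- ===== CLAIM (what is proved, stated in full; the proofs are below) =====
def Claim_equal_build_prompt_rows_py : Prop := ∀ (words : List String), Dom_build_prompt_rows_py words → Spec_build_prompt_rows_py words (build_prompt_rows_py words)

-- ===== LEMMAS AND PROOFS =====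

-- the canonical run-collapsing machine: p = "last emitted character is an underscore"
def pvCol : Bool → List Char → List Char
  | _, [] => []
  | p, c :: t => if c = '_' then (if p then pvCol true t else '_' :: pvCol true t) else c :: pvCol false t

theorem pvCol_pass (p : Bool) (cs : List Char) : pvCol p (pvPass cs) = pvCol p cs := by
  induction cs using pvPass.induct generalizing p with
  | case1 t ih => cases p <;> simp [pvPass, pvCol, ih]
  | case2 c t hne ih =>
    by_cases hc : c = '_'
    · subst hc
      cases t with
      | nil => simp [pvPass, pvCol]
      | cons c' t' =>
        have hc' : c' ≠ '_' := fun hh => hne t' rfl (by rw [hh])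
        have h1 : pvPass ('_' :: c' :: t') = '_' :: pvPass (c' :: t') :=
          pvPass_cons '_' (c' :: t') (Or.inr (by simp [hc']))
        have h2 : pvPass (c' :: t') = c' :: pvPass t' := pvPass_cons c' t' (Or.inl hc')
        have h3 : pvCol false (pvPass t') = pvCol false t' := by
          have := ih false
          rw [h2] at this
          simpa [pvCol, hc'] using this
        cases p <;> simp [h1, h2, pvCol, hc', h3]
    · have h1 : pvPass (c :: t) = c :: pvPass t := pvPass_cons c t (Or.inl hc)
      cases p <;> simp [h1, pvCol, hc, ih]
  | case3 => simp [pvPass]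

theorem pvCol_true_head (t : List Char) (h : ∀ c, t.head? = some c → c ≠ '_') :
    pvCol true t = pvCol false t := by
  cases t with
  | nil => rfl
  | cons c t' => simp [pvCol, h c rfl]

theorem pvCol_eq_self (cs : List Char) (h : ¬ ['_', '_'] <:+: cs) : pvCol false cs = cs := by
  induction cs with
  | nil => rfl
  | cons c t ih =>
    have ht : ¬ ['_', '_'] <:+: t := fun hinf => h (hinf.trans (List.suffix_cons c t).isInfix)
    by_cases hc : c = '_'
    · subst hc
      have hhd : pvCol true t = pvCol false t := by
        apply pvCol_true_head
        intro x hx he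
        cases t with
        | nil => simp at hx
        | cons a r =>
          simp only [List.head?_cons, Option.some.injEq] at hx
          subst hx; subst he
          exact h ⟨[], r, by simp⟩
      simp [pvCol, hhd, ih ht]
    · simp [pvCol, hc, ih ht]

theorem pvFixLoop_eq_col (cs : List Char) : pvFixLoop cs = pvCol false cs := by
  induction cs using pvFixLoop.induct with
  | case1 cs h ih =>
    rw [pvFixLoop, dif_pos h, ih, pvReplace_eq, pvCol_pass]
  | case2 cs h =>
    rw [pvFixLoop, dif_neg h]
    exact (pvCol_eq_self cs (fun hi => h ((PySem.Chars.isIn_iff_infix _ _).mpr hi))).symm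

theorem pvLower_ne_underscore (c : Char) (h : PySem.Chars.isalnum c = true) :
    PySem.Chars.lowerChar c ≠ '_' := by
  intro he
  rw [PySem.Chars.lowerChar] at he
  by_cases hu : PySem.Chars.isupper c = true
  · rw [if_pos hu] at he
    have h1 : 65 ≤ c.toNat ∧ c.toNat ≤ 90 := by
      simp only [PySem.Chars.isupper, Bool.and_eq_true, decide_eq_true_eq] at hu
      exact ⟨UInt32.le_iff_toNat_le.mp (Char.le_def.mp hu.1),
             UInt32.le_iff_toNat_le.mp (Char.le_def.mp hu.2)⟩
    have h2 : (Char.ofNat (c.toNat + 32)).toNat = ('_' : Char).toNat := by rw [he]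
    rw [Char.toNat_ofNat, if_pos (Or.inl (by omega))] at h2
    have h3 : ('_' : Char).toNat = 95 := by decide
    omega
  · rw [if_neg hu] at he
    rw [he] at h
    exact absurd h (by decide)

-- B's fold computes pvCol over the mapped characters
theorem pvAlt_fold (w : List Char) (acc : List Char) (p : Bool) :
    (w.foldl
      (fun (st : List Char × Bool) character =>
        if PySem.Chars.isalnum character then (st.1 ++ [PySem.Chars.lowerChar character], false)
        else if st.2 then st
        else (st.1 ++ ['_'], true)) (acc, p)).1
    = acc ++ pvCol p (w.map (fun character =>
        if PySem.Chars.isalnum character then PySem.Chars.lowerChar character else '_')) := by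
  induction w generalizing acc p with
  | nil => simp [pvCol]
  | cons c t ih =>
    by_cases hc : PySem.Chars.isalnum c = true
    · simp only [List.foldl_cons, List.map_cons, hc, if_true]
      rw [ih]
      simp [pvCol, pvLower_ne_underscore c hc]
    · simp only [List.foldl_cons, List.map_cons, hc, Bool.false_eq_true, if_false]
      cases p with
      | true => simp only [if_true]; rw [ih]; simp [pvCol]
      | false => simp only [Bool.false_eq_true, if_false]; rw [ih]; simp [pvCol]

def pvQ : Char → Bool := fun c => (['_'] : List Char).contains c

theorem pvQ_underscore : pvQ '_' = true := by decide

theorem pvQ_of_ne (c : Char) (h : c ≠ '_') : pvQ c = false := by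
  simp [pvQ, h]

theorem pvCol_true_drop (t : List Char) :
    pvCol true t = pvCol false (t.dropWhile pvQ) := by
  induction t with
  | nil => rfl
  | cons c t' ih =>
    by_cases hc : c = '_'
    · subst hc; simp [pvCol, pvQ_underscore, ih]
    · simp [pvCol, hc, pvQ_of_ne c hc]

theorem pvDropWhile_head_false (l : List Char) (a : Char) (r : List Char)
    (h : l.dropWhile pvQ = a :: r) : pvQ a = false := by
  induction l with
  | nil => simp at h
  | cons x xs ih =>
    rw [List.dropWhile_cons] at h
    by_cases hx : pvQ x = true
    · rw [if_pos hx] at h; exact ih h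
    · rw [if_neg hx] at h
      injection h with h1 _
      rw [← h1]; exact eq_false_of_ne_true hx

theorem pvCol_dropWhile (t : List Char) :
    (pvCol false t).dropWhile pvQ = pvCol false (t.dropWhile pvQ) := by
  cases t with
  | nil => rfl
  | cons c t' =>
    by_cases hc : c = '_'
    · subst hc
      have hL : pvCol false ('_' :: t') = '_' :: pvCol true t' := by simp [pvCol]
      have hR : ('_' :: t').dropWhile pvQ = t'.dropWhile pvQ := by
        rw [List.dropWhile_cons, if_pos pvQ_underscore]
      rw [hL, List.dropWhile_cons, if_pos pvQ_underscore, hR, pvCol_true_drop]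
      cases hdw : t'.dropWhile pvQ with
      | nil => simp [pvCol]
      | cons a r =>
        have ha : pvQ a = false := pvDropWhile_head_false t' a r hdw
        have ha' : a ≠ '_' := fun hh => by rw [hh, pvQ_underscore] at ha; cases ha
        have hcons : pvCol false (a :: r) = a :: pvCol false r := by simp [pvCol, ha']
        rw [hcons, List.dropWhile_cons, if_neg (by simp [ha])]
    · simp [pvCol, hc, pvQ_of_ne c hc]

-- state of the machine after processing xs
def pvPrev (p : Bool) (xs : List Char) : Bool := xs.foldl (fun _ ch => decide (ch = '_')) p

theorem pvPrev_cons (p : Bool) (a : Char) (t : List Char) :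
    pvPrev p (a :: t) = pvPrev (decide (a = '_')) t := by
  simp [pvPrev]

theorem pvCol_snoc (xs : List Char) (c : Char) (p : Bool) :
    pvCol p (xs ++ [c]) =
      pvCol p xs ++ (if c = '_' then (if pvPrev p xs then [] else ['_']) else [c]) := by
  induction xs generalizing p with
  | nil => by_cases hc : c = '_' <;> cases p <;> simp [pvCol, pvPrev, hc]
  | cons a t ih =>
    by_cases ha : a = '_'
    · subst ha
      cases p <;> simp [pvCol, List.cons_append, ih, pvPrev_cons]
    · simp [pvCol, ha, List.cons_append, ih, pvPrev_cons]

def pvStripR (cs : List Char) : List Char := (cs.reverse.dropWhile pvQ).reverse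

theorem pvStripR_snoc_underscore (ys : List Char) :
    pvStripR (ys ++ ['_']) = pvStripR ys := by
  simp [pvStripR, pvQ_underscore]

theorem pvStripR_snoc_ne (ys : List Char) (c : Char) (h : c ≠ '_') :
    pvStripR (ys ++ [c]) = ys ++ [c] := by
  simp [pvStripR, pvQ_of_ne c h]

theorem pvStripR_col (cs : List Char) :
    pvStripR (pvCol false cs) = pvCol false (pvStripR cs) := by
  induction cs using List.reverseRecOn with
  | nil => rfl
  | append_singleton xs c ih =>
    by_cases hc : c = '_'
    · subst hc
      rw [pvCol_snoc, if_pos rfl]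
      have hlhs : pvStripR (pvCol false xs ++ (if pvPrev false xs then [] else ['_'])) =
          pvStripR (pvCol false xs) := by
        cases hp : pvPrev false xs with
        | true => simp
        | false => simp only [Bool.false_eq_true, if_false]; exact pvStripR_snoc_underscore _
      rw [hlhs, pvStripR_snoc_underscore, ih]
    · rw [pvCol_snoc, if_neg hc, pvStripR_snoc_ne _ c hc, pvStripR_snoc_ne xs c hc,
        pvCol_snoc, if_neg hc]

theorem pvStripChars_eq (s : List Char) :
    PySem.Chars.stripChars s ['_'] = pvStripR (s.dropWhile pvQ) := by
  rfl

theorem pvCol_stripChars (m : List Char) :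
    PySem.Chars.stripChars (pvCol false m) ['_'] = pvCol false (PySem.Chars.stripChars m ['_']) := by
  rw [pvStripChars_eq, pvStripChars_eq, pvCol_dropWhile, pvStripR_col]

theorem sanitize_eq (value : String) : sanitize_label_py value = sanitize_label_alt value := by
  simp only [sanitize_label_py, sanitize_label_alt, pvAlt_fold, List.nil_append,
    pvFixLoop_eq_col, pvCol_stripChars]

theorem pvFoldl_append_map {α β : Type} (l : List α) (g : α → β) (acc : List β) :
    l.foldl (fun rows x => rows ++ [g x]) acc = acc ++ l.map g := by
  induction l generalizing acc with
  | nil => simp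
  | cons a t ih => simp [List.foldl_cons, ih]

-- ===== VERDICT (by name: the statement is the Claim_ definition above) =====
theorem build_prompt_rows_py_spec : Claim_equal_build_prompt_rows_py := by
  intro words _
  unfold Spec_build_prompt_rows_py build_prompt_rows_py build_prompt_rows_py_alt
  rw [pvFoldl_append_map _ _ [], List.nil_append]
  apply List.map_congr_left
  intro iw _
  simp [sanitize_eq]
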